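-- pv_equiv track=rewrite | github.com/pypi-data/pypi-mirror-243 | packages/mcfonts/mcfonts-0.7.tar.gz/mcfonts-0.7/mcfonts/utils/unihex.py | bit_string_to_rows
-- ===== SOURCE A (Python) =====
-- import collections.abc
--
-- def bit_string_to_rows(bit_string: str, reverse: bool = True) -> collections.abc.Iterable[str]:
--     """
--     Convert `bit_string` into a yield of strings, with each character in the string being either "1" or "0".
--
--     If `reverse` (the default), the rows will be flipped vertically.
--
--     >>> list(bit_string_to_rows("0000000018242442427E424242420000"))
--     [
--         '00000000',
--         '00000000',
--         '01000010',
--         '01000010',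
--         '01000010',
--         '01000010',
--         '01111110',
--         '01000010',
--         '01000010',
--         '00100100',
--         '00100100',
--         '00011000',
--         '00000000',
--         '00000000',
--         '00000000',
--         '00000000'
--     ]
--
--     :param bit_string: The bit string.
--     :param reverse:
--         Whether to flip the image along the Y-axis.
--         This is to match the normal behavior of iterating over the pixels of a :class:`PIL.Image.Image`,
--         from the bottom-left to the top-right, row first.
--     :return:
--     """
--     row_width_hex = len(bit_string) >> 4  # len // 16
--     row_width_bin = len(bit_string) >> 2  # len // 4
--     if reverse:
--         for i in reversed(range(0, len(bit_string), row_width_hex)):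
--             yield bin(int(bit_string[i : i + row_width_hex], 16))[2:].zfill(row_width_bin)
--     else:
--         for i in range(0, len(bit_string), row_width_hex):
--             yield bin(int(bit_string[i : i + row_width_hex], 16))[2:].zfill(row_width_bin)
-- ===== SOURCE B (Python) =====
-- def bit_string_to_rows(bit_string: str, reverse: bool = True):
--     # Different decomposition: expand the WHOLE string into one flat bit string
--     # first (4 bits per hex digit), then cut the flat string into rows by a
--     # recursive chunker and left-pad each row to the declared width; the
--     # finished row list is reversed once when `reverse` is set.
--     row_width_hex = len(bit_string) >> 4
--     row_width_bin = len(bit_string) >> 2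
--     if row_width_hex <= 0:
--         raise ValueError("bit string too short to contain rows")
--     flat = "".join(format(int(c, 16), "b").rjust(4, "0") for c in bit_string)
--     rows = [chunk.rjust(row_width_bin, "0") for chunk in _chunks(flat, 4 * row_width_hex)]
--     if reverse:
--         rows.reverse()
--     yield from rows
--
--
-- def _chunks(s, k):
--     if not s:
--         return []
--     return [s[:k]] + _chunks(s[k:], k)
-- ===== Notes on version B (the rewrite author's own statement) =====
-- stated objective: alternative
-- what changed: B expands the whole string into one flat bit string first (4 bits per hex digit, no whole-chunk int/bin round-trip), cuts it into rows with a recursive chunker instead of iterating index ranges and slicing the hex string, left-pads each row with rjust, and reverses the finished row list once instead of iterating a reversed range.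
import Mathlib
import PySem

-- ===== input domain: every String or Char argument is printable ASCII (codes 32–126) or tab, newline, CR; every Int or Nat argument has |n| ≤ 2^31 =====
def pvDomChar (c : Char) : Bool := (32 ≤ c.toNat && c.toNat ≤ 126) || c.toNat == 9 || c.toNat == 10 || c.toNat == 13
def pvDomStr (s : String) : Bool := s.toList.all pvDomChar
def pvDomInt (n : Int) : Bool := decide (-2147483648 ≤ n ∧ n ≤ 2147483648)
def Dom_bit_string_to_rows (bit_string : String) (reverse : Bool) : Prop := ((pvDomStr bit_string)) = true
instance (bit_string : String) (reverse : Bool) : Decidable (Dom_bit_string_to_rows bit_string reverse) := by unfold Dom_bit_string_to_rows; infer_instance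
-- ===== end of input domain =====

-- B expands the WHOLE string into one flat bit string first (4 bits per hex digit), then cuts it
-- into rows with a recursive chunker and left-pads each row; same cost, different decomposition.

-- ===== PORT A =====
-- `len(bit_string) >> 4` / `>> 2`: `>>>` on Int (length is nonnegative, where it agrees with Python's shift).
-- `int(chunk, 16)` is ported by hand as a positional fold over PySem.Int.digitVal? — exact for the
-- nonempty bare-hex-digit chunks Pre_ guarantees (no sign/whitespace/underscore/'0x' forms).
-- `bin(v)` is PySem.Int.toBinChars0b, `[2:]` is slice 2..none, `.zfill` is PySem.Chars.zfill.
def bit_string_to_rows (bit_string : String) (reverse : Bool) : List String :=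
  let cs := bit_string.toList
  let n : Int := PySem.Str.len bit_string
  let row_width_hex : Int := n >>> 4
  let row_width_bin : Int := n >>> 2
  let row : Int → String := fun i =>
    String.ofList (PySem.Chars.zfill
      (PySem.List.slice (PySem.Int.toBinChars0b
        ((PySem.List.slice cs (some i) (some (i + row_width_hex))).foldl
          (fun a c => 16 * a + ((PySem.Int.digitVal? c).getD 0 : Nat)) 0))
        (some 2) none) row_width_bin)
  if reverse then ((PySem.List.pyRange 0 n row_width_hex).reverse).map row
  else (PySem.List.pyRange 0 n row_width_hex).map row

-- ===== PORT B =====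
-- `.rjust(w, "0")` on a w'-char string: left-pad with zeros up to w (no-op when w ≤ w').
def pvRjust0 (l : List Char) (w : Int) : List Char :=
  List.replicate (w.toNat - l.length) '0' ++ l

-- `format(int(c, 16), "b").rjust(4, "0")`: PySem.Int.toBinChars of PySem.Int.ofCharsBase? [c] 16
-- (the `.getD 0` is unreachable under Pre_, where every character is a hex digit), padded to 4.
def pvNib (c : Char) : List Char :=
  pvRjust0 (PySem.Int.toBinChars ((PySem.Int.ofCharsBase? [c] 16).getD 0)) 4

-- Source B's `_chunks`: recursive split into consecutive pieces of length k (`s[:k]` / `s[k:]`);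
-- the k = 0 branch is unreachable in the port (Source B raised ValueError before calling it).
def pvChunks : List Char → Nat → List (List Char)
  | [], _ => []
  | _ :: _, 0 => []
  | c :: t, k + 1 => ((c :: t).take (k + 1)) :: pvChunks ((c :: t).drop (k + 1)) (k + 1)
termination_by s _ => s.length
decreasing_by simp

def bit_string_to_rows_alt (bit_string : String) (reverse : Bool) : List String :=
  let row_width_hex : Int := PySem.Str.len bit_string >>> 4
  let row_width_bin : Int := PySem.Str.len bit_string >>> 2
  if row_width_hex ≤ 0 then []  -- Source B raises ValueError here; excluded by Pre_
  else
    let flat := bit_string.toList.flatMap pvNib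
    let rows := (pvChunks flat (4 * row_width_hex).toNat).map
      (fun chunk => String.ofList (pvRjust0 chunk row_width_bin))
    if reverse then rows.reverse else rows

-- ===== PRECONDITION & SPEC =====
def pvHexChars : List Char :=
  ['0','1','2','3','4','5','6','7','8','9','a','b','c','d','e','f','A','B','C','D','E','F']

-- Pre_ excludes strings shorter than 16 characters (row_width_hex = 0 makes range() raise
-- ValueError in A, and B raises ValueError on its guard) and strings containing any non-hex-digit
-- character: there int(chunk, 16) either raises, or accepts sign/space/underscore/'0x' forms (and
-- '-' makes bin() emit a 'b') that B's per-digit expansion raises ValueError on.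
def Pre_bit_string_to_rows (bit_string : String) (reverse : Bool) : Prop :=
  16 ≤ bit_string.toList.length ∧ bit_string.toList.all (fun c => decide (c ∈ pvHexChars)) = true
instance (bit_string : String) (reverse : Bool) : Decidable (Pre_bit_string_to_rows bit_string reverse) := by unfold Pre_bit_string_to_rows; infer_instance

def pvWitness_bit_string_to_rows : String × Bool := ("00ff00ff00ff00ff", true)

def Spec_bit_string_to_rows (bit_string : String) (reverse : Bool) (out : List String) : Prop := out = bit_string_to_rows_alt bit_string reverse
instance (bit_string : String) (reverse : Bool) (out : List String) : Decidable (Spec_bit_string_to_rows bit_string reverse out) := by unfold Spec_bit_string_to_rows; infer_instance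

-- ===== CLAIM (what is proved, stated in full; the proofs are below) =====
def Claim_equal_bit_string_to_rows : Prop := ∀ (bit_string : String) (reverse : Bool), Dom_bit_string_to_rows bit_string reverse → Pre_bit_string_to_rows bit_string reverse → Spec_bit_string_to_rows bit_string reverse (bit_string_to_rows bit_string reverse)

-- ===== LEMMAS AND PROOFS =====

-- `Nat.toDigits 2`: accumulator and fuel facts for the one recurrence the proof needs.
theorem pv_tdc_acc (b : Nat) : ∀ f n l, Nat.toDigitsCore b f n l = Nat.toDigitsCore b f n [] ++ l := by
  intro f
  induction f with
  | zero => intro n l; simp [Nat.toDigitsCore]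
  | succ f ih =>
    intro n l
    simp only [Nat.toDigitsCore]
    by_cases h : n / b = 0
    · simp [h]
    · simp only [h, if_false]
      rw [ih (n/b) (Nat.digitChar (n % b) :: l), ih (n/b) [Nat.digitChar (n % b)]]
      simp

theorem pv_tdc_fuel : ∀ n f f', n < f → n < f' → Nat.toDigitsCore 2 f n [] = Nat.toDigitsCore 2 f' n [] := by
  intro n
  induction n using Nat.strong_induction_on with
  | _ n ih =>
    intro f f' hf hf'
    match f, f' with
    | f+1, f'+1 =>
      simp only [Nat.toDigitsCore]
      by_cases h : n / 2 = 0
      · simp [h]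
      · simp only [h, if_false]
        rw [pv_tdc_acc 2 f, pv_tdc_acc 2 f', ih (n/2) (by omega) f f' (by omega) (by omega)]

theorem pv_tdc_step (f n : Nat) (l : List Char) : Nat.toDigitsCore 2 (f+1) n l =
    if n / 2 = 0 then Nat.digitChar (n % 2) :: l
    else Nat.toDigitsCore 2 f (n / 2) (Nat.digitChar (n % 2) :: l) := rfl

theorem pv_toDigits2_rec (v b : Nat) (hv : 0 < v) (hb : b < 2) :
    Nat.toDigits 2 (2*v + b) = Nat.toDigits 2 v ++ [Nat.digitChar b] := by
  show Nat.toDigitsCore 2 (2*v+b+1) (2*v+b) [] = Nat.toDigitsCore 2 (v+1) v [] ++ [Nat.digitChar b]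
  rw [pv_tdc_step]
  have h1 : (2*v+b) / 2 = v := by omega
  have h2 : (2*v+b) % 2 = b := by omega
  have h3 : ¬ v = 0 := by omega
  rw [h1, h2]
  simp only [h3, if_false]
  rw [pv_tdc_acc 2 (2*v+b) v, pv_tdc_fuel v (2*v+b) (v+1) (by omega) (by omega)]

theorem pv_toDigits2_ne_nil (n : Nat) : Nat.toDigits 2 n ≠ [] := by
  show Nat.toDigitsCore 2 (n+1) n [] ≠ []
  rw [pv_tdc_step]
  by_cases h : n / 2 = 0
  · simp [h]
  · simp only [h, if_false]
    rw [pv_tdc_acc]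
    exact List.append_ne_nil_of_right_ne_nil _ (by simp)

-- values of bit strings and hex strings
def pvBval (s : List Char) : Nat := s.foldl (fun a c => 2*a + (if c = '1' then 1 else 0)) 0
def pvHexVal (c : Char) : Nat := (PySem.Int.digitVal? c).getD 0
def pvHval (s : List Char) : Nat := s.foldl (fun a c => 16*a + pvHexVal c) 0

theorem pv_foldl_affine (k : Nat) (g : Char → Nat) :
    ∀ (s : List Char) (a : Nat), s.foldl (fun a c => k*a + g c) a
      = a * k ^ s.length + s.foldl (fun a c => k*a + g c) 0 := by
  intro s
  induction s with
  | nil => intro a; simp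
  | cons c t ih =>
    intro a
    simp only [List.foldl_cons, List.length_cons]
    rw [show k*0 + g c = g c by omega]
    rw [ih (k*a + g c), ih (g c)]
    ring

theorem pv_bval_append (s t : List Char) : pvBval (s ++ t) = pvBval s * 2 ^ t.length + pvBval t := by
  unfold pvBval
  rw [List.foldl_append, pv_foldl_affine 2 _ t (List.foldl _ 0 s)]

theorem pv_hval_cons (c : Char) (t : List Char) :
    pvHval (c :: t) = pvHexVal c * 16 ^ t.length + pvHval t := by
  unfold pvHval
  simp only [List.foldl_cons]
  rw [pv_foldl_affine 16 pvHexVal t (16*0 + pvHexVal c)]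
  ring_nf

theorem pv_intfold_eq (s : List Char) :
    s.foldl (fun (a : Int) c => 16 * a + ((PySem.Int.digitVal? c).getD 0 : Nat)) 0 = (pvHval s : Int) := by
  suffices h : ∀ (a : Nat), s.foldl (fun (a : Int) c => 16 * a + ((PySem.Int.digitVal? c).getD 0 : Nat)) (a : Nat)
      = (s.foldl (fun a c => 16*a + pvHexVal c) a : Nat) by
    exact_mod_cast h 0
  induction s with
  | nil => intro a; rfl
  | cons c t ih =>
    intro a
    simp only [List.foldl_cons]
    have : (16 * (a : Int) + ((PySem.Int.digitVal? c).getD 0 : Nat)) = ((16*a + pvHexVal c : Nat) : Int) := by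
      unfold pvHexVal; push_cast; ring
    rw [this, ih]

-- per-hex-digit facts, by exhausting the 22 hex characters
theorem pv_nib_facts (c : Char) (hc : c ∈ pvHexChars) :
    (pvNib c).length = 4 ∧ ((pvNib c).all (fun x => x == '0' || x == '1') = true) ∧
      pvBval (pvNib c) = pvHexVal c ∧ PySem.Int.ofCharsBase? [c] 16 = some (pvHexVal c) := by
  simp only [pvHexChars, List.mem_cons, List.not_mem_nil, or_false] at hc
  rcases hc with rfl|rfl|rfl|rfl|rfl|rfl|rfl|rfl|rfl|rfl|rfl|rfl|rfl|rfl|rfl|rfl|rfl|rfl|rfl|rfl|rfl|rfl <;> decide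

-- the minimal binary digits of the value of a bit string that starts with '1' are the string itself
theorem pv_toDigits_one_cons : ∀ (t : List Char), (∀ c ∈ t, c = '0' ∨ c = '1') →
    Nat.toDigits 2 (pvBval ('1' :: t)) = '1' :: t := by
  intro t
  induction t using List.reverseRecOn with
  | nil => intro _; decide
  | append_singleton t b ih =>
    intro h01
    have hb : b = '0' ∨ b = '1' := h01 b (by simp)
    have hv : 0 < pvBval ('1' :: t) := by
      have h2 : pvBval ('1' :: t) = 1 * 2 ^ t.length + pvBval t := by
        simpa [pvBval] using pv_bval_append ['1'] t
      have h3 : 0 < 2 ^ t.length := Nat.two_pow_pos t.length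
      omega
    have hrec : pvBval ('1' :: (t ++ [b])) = 2 * pvBval ('1' :: t) + (if b = '1' then 1 else 0) := by
      rw [show ('1' :: (t ++ [b])) = (('1' :: t) ++ [b]) from by simp,
          pv_bval_append ('1' :: t) [b]]
      simp [pvBval, mul_comm]
    rw [show ('1' :: (t ++ [b])) = (('1' :: t) ++ [b]) by simp] at *
    rw [hrec]
    rw [pv_toDigits2_rec _ _ hv (by rcases hb with h | h <;> simp [h])]
    rw [ih (fun c hc => h01 c (by simp [hc]))]
    rcases hb with h | h <;> simp [h] <;> rfl

-- every nonempty 0/1 string is its minimal binary digits with leading zeros restored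
theorem pv_canon : ∀ (s : List Char), s ≠ [] → (∀ c ∈ s, c = '0' ∨ c = '1') →
    (Nat.toDigits 2 (pvBval s)).length ≤ s.length ∧
      s = List.replicate (s.length - (Nat.toDigits 2 (pvBval s)).length) '0' ++ Nat.toDigits 2 (pvBval s) := by
  intro s
  induction s with
  | nil => intro h; exact absurd rfl h
  | cons c t ih =>
    intro _ h01
    rcases h01 c (by simp) with hc | hc
    · subst hc
      rcases List.eq_nil_or_concat t with rfl | _
      · exact ⟨by decide, by decide⟩
      · have ht : t ≠ [] := by rename_i h; rcases h with ⟨l, a, rfl⟩; simp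
        have hbv : pvBval ('0' :: t) = pvBval t := by simp [pvBval]
        obtain ⟨hlen, hdec⟩ := ih ht (fun c hc => h01 c (by simp [hc]))
        rw [hbv]
        refine ⟨by simpa using Nat.le_succ_of_le hlen, ?_⟩
        have : ('0' :: t).length - (Nat.toDigits 2 (pvBval t)).length
            = (t.length - (Nat.toDigits 2 (pvBval t)).length) + 1 := by
          simp only [List.length_cons]; omega
        rw [this, List.replicate_succ]
        simpa using hdec
    · subst hc
      have := pv_toDigits_one_cons t (fun c hc => h01 c (by simp [hc]))
      rw [this]
      simp

-- chunk-level: the flat per-digit expansion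
theorem pv_flat_facts : ∀ (s : List Char), (∀ c ∈ s, c ∈ pvHexChars) →
    (s.flatMap pvNib).length = 4 * s.length ∧ (∀ x ∈ s.flatMap pvNib, x = '0' ∨ x = '1') ∧
      pvBval (s.flatMap pvNib) = pvHval s := by
  intro s
  induction s with
  | nil => intro _; refine ⟨by simp, by simp, by simp [pvBval, pvHval]⟩
  | cons c t ih =>
    intro hh
    obtain ⟨hlen, h01, hval⟩ := ih (fun x hx => hh x (by simp [hx]))
    obtain ⟨nlen, n01b, nval, _⟩ := pv_nib_facts c (hh c (by simp))
    have n01 : ∀ x ∈ pvNib c, x = '0' ∨ x = '1' := by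
      intro x hx
      simpa using List.all_eq_true.mp n01b x hx
    refine ⟨by simp [hlen, nlen]; ring, ?_, ?_⟩
    · intro x hx
      simp only [List.flatMap_cons] at hx
      rcases List.mem_append.mp hx with h | h
      · exact n01 x h
      · exact h01 x h
    · have : (c :: t).flatMap pvNib = pvNib c ++ t.flatMap pvNib := by simp
      rw [this, pv_bval_append, hval, nval, hlen, pv_hval_cons]
      congr 1
      rw [pow_mul]
      norm_num

theorem pv_zfill01 (c : Char) (rest : List Char) (w : Int) (hc1 : c ≠ '+') (hc2 : c ≠ '-')
    (hw0 : 0 ≤ w) (hw : (c :: rest).length ≤ w.toNat) :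
    PySem.Chars.zfill (c :: rest) w = List.replicate (w.toNat - (c :: rest).length) '0' ++ (c :: rest) := by
  simp only [PySem.Chars.zfill]
  by_cases h : w ≤ ((c :: rest).length : Int)
  · rw [if_pos h]
    have hlen : w.toNat = (c :: rest).length := by omega
    rw [hlen, Nat.sub_self]
    simp
  · rw [if_neg h, if_neg (by simp [hc1, hc2])]

-- the per-row equality: A's parse-bin-zfill of a hex chunk is B's padded flat expansion
theorem pv_row_eq (chunk : List Char) (w : Int) (hne : chunk ≠ [])
    (hhex : ∀ c ∈ chunk, c ∈ pvHexChars) (hw0 : 0 ≤ w) (hw : 4 * chunk.length ≤ w.toNat) :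
    PySem.Chars.zfill
      (PySem.List.slice (PySem.Int.toBinChars0b
        (chunk.foldl (fun a c => 16 * a + ((PySem.Int.digitVal? c).getD 0 : Nat)) 0)) (some 2) none) w
    = pvRjust0 (chunk.flatMap pvNib) w := by
  obtain ⟨flen, f01, fval⟩ := pv_flat_facts chunk hhex
  rw [pv_intfold_eq chunk]
  have hnn : ¬ ((pvHval chunk : Int) < 0) := Int.not_lt.mpr (Int.natCast_nonneg _)
  have h0b : PySem.Int.toBinChars0b ((pvHval chunk : Nat) : Int)
      = '0' :: 'b' :: Nat.toDigits 2 (pvHval chunk) := by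
    simp [PySem.Int.toBinChars0b, hnn]
  rw [h0b]
  have hslice : PySem.List.slice ('0' :: 'b' :: Nat.toDigits 2 (pvHval chunk)) (some 2) none
      = Nat.toDigits 2 (pvHval chunk) := by
    rw [PySem.List.slice_from _ (by norm_num : (0:Int) ≤ 2)]
    rfl
  rw [hslice]
  set V := pvHval chunk with hV
  set flat := chunk.flatMap pvNib with hflat
  have hfne : flat ≠ [] := by
    have h1 : 0 < chunk.length := List.length_pos_iff.mpr hne
    have h2 : 0 < flat.length := by rw [flen]; omega
    exact List.ne_nil_of_length_pos h2
  obtain ⟨hlen2, hdec⟩ := pv_canon flat hfne f01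
  rw [fval] at hlen2 hdec
  obtain ⟨d, rest, htd⟩ := List.exists_cons_of_ne_nil (pv_toDigits2_ne_nil V)
  have hdmem : d ∈ flat := by rw [hdec, htd]; simp
  have hd01 := f01 d hdmem
  have hwf : flat.length ≤ w.toNat := by rw [flen]; exact hw
  have hlenle : (Nat.toDigits 2 V).length ≤ w.toNat := le_trans hlen2 hwf
  rw [htd]
  rw [pv_zfill01 d rest w (by rcases hd01 with h | h <;> simp [h]) (by rcases hd01 with h | h <;> simp [h]) hw0 (htd ▸ hlenle)]
  rw [← htd]
  unfold pvRjust0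
  rw [hdec]
  rw [show w.toNat - (List.replicate (flat.length - (Nat.toDigits 2 V).length) '0' ++ Nat.toDigits 2 V).length
        = w.toNat - flat.length by rw [← hdec]]
  rw [← List.append_assoc, ← List.replicate_add]
  congr 2
  have : (List.replicate (flat.length - (Nat.toDigits 2 V).length) '0' ++ Nat.toDigits 2 V).length = flat.length := by
    rw [← hdec]
  simp at this
  omega

-- flatMap over 4-char blocks commutes with take/drop at a 4-multiple
theorem pv_flatMap_take (f : Char → List Char) : ∀ (cs : List Char) (k : Nat),
    (∀ c ∈ cs, (f c).length = 4) → (cs.flatMap f).take (4*k) = (cs.take k).flatMap f := by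
  intro cs
  induction cs with
  | nil => intro k _; simp
  | cons c t ih =>
    intro k h4
    cases k with
    | zero => simp
    | succ k =>
      rw [List.flatMap_cons, List.take_append]
      rw [List.take_of_length_le (by rw [h4 c (by simp)]; omega)]
      rw [h4 c (by simp), show 4*(k+1) - 4 = 4*k by omega]
      rw [ih k (fun x hx => h4 x (by simp [hx]))]
      simp

theorem pv_flatMap_drop (f : Char → List Char) : ∀ (cs : List Char) (k : Nat),
    (∀ c ∈ cs, (f c).length = 4) → (cs.flatMap f).drop (4*k) = (cs.drop k).flatMap f := by
  intro cs
  induction cs with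
  | nil => intro k _; simp
  | cons c t ih =>
    intro k h4
    cases k with
    | zero => simp
    | succ k =>
      rw [List.flatMap_cons, List.drop_append]
      rw [List.drop_of_length_le (by rw [h4 c (by simp)]; omega)]
      rw [h4 c (by simp), show 4*(k+1) - 4 = 4*k by omega]
      rw [ih k (fun x hx => h4 x (by simp [hx]))]
      simp

-- one step of range(0, m, k) for positive k
theorem pv_pyRange_pos_cons (m k : Int) (hk : 0 < k) (hm : 0 < m) :
    PySem.List.pyRange 0 m k = 0 :: (PySem.List.pyRange 0 (m - k) k).map (fun i => i + k) := by
  rw [PySem.List.pyRange_of_pos _ _ hk, PySem.List.pyRange_of_pos _ _ hk]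
  rw [if_pos hm]
  have hdiv : (m - 0 + k - 1) / k = (m - 1) / k + 1 := by
    rw [show m - 0 + k - 1 = (m - 1) + 1 * k by ring, Int.add_mul_ediv_right _ _ (ne_of_gt hk)]
  have hnn : 0 ≤ (m - 1) / k := Int.ediv_nonneg (by omega) (by omega)
  have hN : ((m - 0 + k - 1) / k).toNat = ((m - 1) / k).toNat + 1 := by
    rw [hdiv]; omega
  rw [hN, List.range_succ_eq_map, List.map_cons, List.map_map]
  by_cases hmk : 0 < m - k
  · rw [if_pos hmk]
    have : (m - k - 0 + k - 1) / k = (m - 1) / k := by ring_nf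
    rw [this, List.map_map]
    refine congrArg₂ _ (by ring) ?_
    apply List.map_congr_left
    intro j _
    simp only [Function.comp]
    push_cast
    ring
  · rw [if_neg hmk]
    have h0 : (m - 1) / k = 0 := Int.ediv_eq_zero_of_lt (by omega) (by omega)
    rw [h0]
    simp

-- cutting the flat bit string into 4k-blocks is chunking the hex string into k-blocks and expanding
theorem pv_flatMap_len (f : Char → List Char) : ∀ (cs : List Char),
    (∀ c ∈ cs, (f c).length = 4) → (cs.flatMap f).length = 4 * cs.length := by
  intro cs
  induction cs with
  | nil => intro _; simp
  | cons c t ih =>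
    intro h4
    rw [List.flatMap_cons, List.length_append, h4 c (by simp),
        ih (fun x hx => h4 x (by simp [hx]))]
    simp
    ring

theorem pv_slice_shift (cs : List Char) (k : Nat) (i : Int) (hi : 0 ≤ i) :
    PySem.List.slice cs (some (i + (k:Int))) (some (i + (k:Int) + (k:Int)))
      = PySem.List.slice (cs.drop k) (some i) (some (i + (k:Int))) := by
  rw [PySem.List.slice_toNat _ (by omega) (by omega), PySem.List.slice_toNat _ hi (by omega)]
  rw [List.drop_drop]
  congr 1
  · omega
  · congr 1
    omega

theorem pv_chunks_eq_fuel (k : Nat) (hk : 0 < k) : ∀ (n : Nat) (cs : List Char), cs.length ≤ n →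
    (∀ c ∈ cs, (pvNib c).length = 4) →
    pvChunks (cs.flatMap pvNib) (4*k)
      = (PySem.List.pyRange 0 cs.length (k : Int)).map
          (fun i => (PySem.List.slice cs (some i) (some (i + (k : Int)))).flatMap pvNib) := by
  intro n
  induction n with
  | zero =>
    intro cs hn _
    have : cs = [] := List.eq_nil_of_length_eq_zero (by omega)
    subst this
    rw [List.flatMap_nil, pvChunks]
    simp [PySem.List.pyRange_of_pos _ _ (by exact_mod_cast hk : (0:Int) < (k:Int))]
  | succ n ihn =>
    intro cs hn h4
    match cs with
    | [] =>
      rw [List.flatMap_nil, pvChunks]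
      simp [PySem.List.pyRange_of_pos _ _ (by exact_mod_cast hk : (0:Int) < (k:Int))]
    | c :: t =>
      have hkpos : (0:Int) < (k:Int) := by exact_mod_cast hk
      have hm : (0:Int) < ((c :: t).length : Int) := by
        simp only [List.length_cons]
        exact_mod_cast Nat.succ_pos t.length
      -- unfold one step of pvChunks
      have hflen : ((c :: t).flatMap pvNib).length = 4 * (c :: t).length :=
        pv_flatMap_len pvNib (c :: t) h4
      obtain ⟨x, xs, hxs⟩ := List.exists_cons_of_ne_nil
        (List.ne_nil_of_length_pos (by rw [hflen]; simp only [List.length_cons]; omega) :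
          (c :: t).flatMap pvNib ≠ [])
      obtain ⟨k', rfl⟩ : ∃ k', k = k' + 1 := ⟨k - 1, by omega⟩
      have hstep : pvChunks ((c :: t).flatMap pvNib) (4*(k'+1))
          = ((c :: t).flatMap pvNib).take (4*(k'+1))
            :: pvChunks (((c :: t).flatMap pvNib).drop (4*(k'+1))) (4*(k'+1)) := by
        rw [hxs, show 4*(k'+1) = (4*k'+3) + 1 by ring, pvChunks]
      rw [hstep,
          pv_flatMap_take pvNib (c :: t) (k'+1) h4,
          pv_flatMap_drop pvNib (c :: t) (k'+1) h4]
      set k := k' + 1 with hkdef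
      -- one step of the range
      rw [pv_pyRange_pos_cons _ _ hkpos hm, List.map_cons, List.map_map]
      -- head
      have hhead : (PySem.List.slice (c :: t) (some 0) (some (0 + (k:Int)))).flatMap pvNib
          = ((c :: t).take k).flatMap pvNib := by
        rw [zero_add, show ((k:Int)) = ((k:Nat):Int) from rfl]
        rw [PySem.List.slice_zero_start, PySem.List.slice_to_natCast]
      -- tail via IH on the dropped list
      have hdroplen : ((c :: t).drop k).length ≤ n := by
        simp only [List.length_drop, List.length_cons] at hn ⊢
        omega
      have hih := ihn ((c :: t).drop k) hdroplen (fun x hx => h4 x (List.mem_of_mem_drop hx))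
      have hrangedrop : PySem.List.pyRange 0 (((c :: t).drop k).length : Int) (k:Int)
          = PySem.List.pyRange 0 (((c :: t).length : Int) - (k:Int)) (k:Int) := by
        by_cases hkm : k ≤ (c :: t).length
        · congr 1
          simp only [List.length_drop, List.length_cons] at hkm ⊢
          omega
        · rw [PySem.List.pyRange_of_pos _ _ hkpos, PySem.List.pyRange_of_pos _ _ hkpos]
          rw [if_neg (by simp only [List.length_drop, List.length_cons] at hkm ⊢; omega),
              if_neg (by simp only [List.length_cons] at hkm ⊢; push_cast; omega)]
      rw [hrangedrop] at hih
      -- align the head and the shifted tail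
      refine congrArg₂ List.cons hhead.symm ?_
      rw [hih]
      apply List.map_congr_left
      intro i himem
      obtain ⟨hi0, -, -⟩ := (PySem.List.mem_pyRange_iff_of_pos hkpos i).mp himem
      simp only [Function.comp]
      rw [pv_slice_shift (c :: t) k i hi0]

theorem pv_chunks_eq (k : Nat) (hk : 0 < k) (cs : List Char)
    (h4 : ∀ c ∈ cs, (pvNib c).length = 4) :
    pvChunks (cs.flatMap pvNib) (4*k)
      = (PySem.List.pyRange 0 cs.length (k : Int)).map
          (fun i => (PySem.List.slice cs (some i) (some (i + (k : Int)))).flatMap pvNib) :=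
  pv_chunks_eq_fuel k hk cs.length cs le_rfl h4

-- ===== VERDICT helpers =====
theorem pv_shift4 (m : Nat) : ((m:Int) >>> (4:Int)) = ((m / 16 : Nat) : Int) := by
  rw [show (4:Int) = ((4:Nat):Int) from rfl, Int.shiftRight_natCast, Nat.shiftRight_eq_div_pow]

theorem pv_shift2 (m : Nat) : ((m:Int) >>> (2:Int)) = ((m / 4 : Nat) : Int) := by
  rw [show (2:Int) = ((2:Nat):Int) from rfl, Int.shiftRight_natCast, Nat.shiftRight_eq_div_pow]

theorem bit_string_to_rows_spec : Claim_equal_bit_string_to_rows := by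
  intro s r _ hpre
  obtain ⟨hlen16, hhexb⟩ := hpre
  have hhex : ∀ c ∈ s.toList, c ∈ pvHexChars := fun c hc =>
    of_decide_eq_true (List.all_eq_true.mp hhexb c hc)
  have h4 : ∀ c ∈ s.toList, (pvNib c).length = 4 := fun c hc =>
    (pv_nib_facts c (hhex c hc)).1
  unfold Spec_bit_string_to_rows bit_string_to_rows bit_string_to_rows_alt
  dsimp only
  rw [PySem.Str.len_eq, pv_shift4, pv_shift2]
  set m := s.toList.length with hm
  have hk : 0 < m / 16 := by omega
  rw [if_neg (by push_cast; omega : ¬ (((m/16 : Nat) : Int) ≤ 0))]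
  have htn : (4 * ((m/16 : Nat) : Int)).toNat = 4 * (m / 16) := by omega
  rw [htn, pv_chunks_eq (m/16) hk s.toList h4, List.map_map, ← hm]
  have hrow : ∀ i ∈ PySem.List.pyRange 0 (m : Int) ((m/16 : Nat) : Int),
      String.ofList (PySem.Chars.zfill
        (PySem.List.slice (PySem.Int.toBinChars0b
          ((PySem.List.slice s.toList (some i) (some (i + ((m/16 : Nat) : Int)))).foldl
            (fun a c => 16 * a + ((PySem.Int.digitVal? c).getD 0 : Nat)) 0))
          (some 2) none) ((m/4 : Nat) : Int))
      = String.ofList (pvRjust0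
          ((PySem.List.slice s.toList (some i) (some (i + ((m/16 : Nat) : Int)))).flatMap pvNib)
          ((m/4 : Nat) : Int)) := by
    intro i hi
    have hstep : (0:Int) < ((m/16 : Nat) : Int) := by exact_mod_cast hk
    obtain ⟨h0i, him, -⟩ := (PySem.List.mem_pyRange_iff_of_pos hstep i).mp hi
    have hchunk : PySem.List.slice s.toList (some i) (some (i + ((m/16 : Nat) : Int)))
        = List.take (m/16) (List.drop i.toNat s.toList) := by
      rw [PySem.List.slice_toNat _ h0i (by omega)]
      congr 1
      omega
    have hitm : i.toNat < m := by omega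
    have hclen : (List.take (m/16) (List.drop i.toNat s.toList)).length
        = min (m/16) (m - i.toNat) := by
      rw [List.length_take, List.length_drop]
    congr 1
    rw [hchunk]
    apply pv_row_eq
    · apply List.ne_nil_of_length_pos
      rw [hclen]
      omega
    · intro c hc
      exact hhex c (List.mem_of_mem_drop (List.mem_of_mem_take hc))
    · exact Int.natCast_nonneg _
    · rw [hclen]
      simp only [Int.toNat_natCast]
      omega
  cases r with
  | true =>
    rw [if_pos rfl, if_pos rfl, List.map_reverse]
    exact congrArg List.reverse (List.map_congr_left hrow)
  | false =>
    rw [if_neg (by simp), if_neg (by simp)]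
    apply List.map_congr_left
    exact hrow
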